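-- pv_equiv track=rewrite | github.com/JDennisUF/fhir_resource_viewer | scripts/fetch_real_data.py | calculate_element_stats
-- ===== SOURCE A (Python) =====
-- def calculate_element_stats(elements):
--     """Calculate statistics for elements"""
--     return {
--         'elementCount': len(elements),
--         'requiredElements': sum(1 for e in elements if e.get('min', 0) > 0),
--         'optionalElements': sum(1 for e in elements if e.get('min', 0) == 0),
--         'summaryElements': sum(1 for e in elements if e.get('isSummary')),
--         'modifierElements': sum(1 for e in elements if e.get('isModifier'))
--     }
-- ===== SOURCE B (Python) =====
-- def _classify(e):
--     """Return the list of category labels this element contributes to."""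
--     m = e.get('min', 0)
--     labels = []
--     if m > 0:
--         labels.append('requiredElements')
--     if m == 0:
--         labels.append('optionalElements')
--     if e.get('isSummary'):
--         labels.append('summaryElements')
--     if e.get('isModifier'):
--         labels.append('modifierElements')
--     return labels
--
--
-- def calculate_element_stats(elements):
--     """Calculate statistics for elements: classify each element into category
--     labels, aggregate the labels into a counting dict, then read the counts."""
--     counts = {}
--     for e in elements:
--         for lab in _classify(e):
--             counts[lab] = counts.get(lab, 0) + 1
--     return {
--         'elementCount': len(elements),
--         'requiredElements': counts.get('requiredElements', 0),
--         'optionalElements': counts.get('optionalElements', 0),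
--         'summaryElements': counts.get('summaryElements', 0),
--         'modifierElements': counts.get('modifierElements', 0)
--     }
-- ===== Notes on version B (the rewrite author's own statement) =====
-- stated objective: alternative
-- what changed: Instead of four predicate-counting passes, B classifies each element into a list of category labels and aggregates all labels in a single counting dict (a Counter-style map-reduce), then reads the per-category counts out of the dict.
import Mathlib
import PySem

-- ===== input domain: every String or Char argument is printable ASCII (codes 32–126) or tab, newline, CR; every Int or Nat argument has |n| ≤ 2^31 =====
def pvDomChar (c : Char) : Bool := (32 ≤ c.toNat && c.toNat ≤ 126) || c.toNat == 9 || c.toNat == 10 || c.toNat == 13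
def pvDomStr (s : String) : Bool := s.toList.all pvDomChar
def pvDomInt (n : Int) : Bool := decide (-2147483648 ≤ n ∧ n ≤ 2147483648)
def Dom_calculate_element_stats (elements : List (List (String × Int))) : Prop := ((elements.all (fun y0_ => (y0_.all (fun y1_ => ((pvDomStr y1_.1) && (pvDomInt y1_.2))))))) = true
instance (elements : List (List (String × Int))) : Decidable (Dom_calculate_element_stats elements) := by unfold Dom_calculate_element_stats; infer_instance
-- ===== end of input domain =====

-- B replaces A's four predicate-counting passes by a classify-then-aggregate pass
-- through a single counting dict (alternative decomposition; same O(n) cost).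


-- ===== PORT A =====
-- truthiness of e.get(k) for an int value: None and 0 are falsy
def pvTruthy : Option Int → Bool
  | some v => v != 0
  | none => false

-- literal port of A: four independent passes (sum(1 for e in elements if …))
def calculate_element_stats (elements : List (List (String × Int))) : List (String × Int) :=
  [("elementCount", (elements.length : Int)),
   ("requiredElements", elements.foldl (fun a e => if (PySem.Dict.mk e).getD "min" 0 > 0 then a + 1 else a) (0 : Int)),
   ("optionalElements", elements.foldl (fun a e => if (PySem.Dict.mk e).getD "min" 0 = 0 then a + 1 else a) (0 : Int)),
   ("summaryElements", elements.foldl (fun a e => if pvTruthy ((PySem.Dict.mk e).get? "isSummary") then a + 1 else a) (0 : Int)),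
   ("modifierElements", elements.foldl (fun a e => if pvTruthy ((PySem.Dict.mk e).get? "isModifier") then a + 1 else a) (0 : Int))]

-- ===== PORT B =====
-- _classify: the list of category labels an element contributes to
def pvClassify (e : List (String × Int)) : List String :=
  let m := (PySem.Dict.mk e).getD "min" 0
  (if m > 0 then ["requiredElements"] else []) ++
  (if m = 0 then ["optionalElements"] else []) ++
  (if pvTruthy ((PySem.Dict.mk e).get? "isSummary") then ["summaryElements"] else []) ++
  (if pvTruthy ((PySem.Dict.mk e).get? "isModifier") then ["modifierElements"] else [])

-- port of B: aggregate all labels into one counting dict, then read the counts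
def calculate_element_stats_alt (elements : List (List (String × Int))) : List (String × Int) :=
  let counts : PySem.Dict String Int :=
    elements.foldl (fun d e =>
      (pvClassify e).foldl (fun d lab => d.modify lab 0 (· + 1)) d) PySem.Dict.empty
  [("elementCount", (elements.length : Int)),
   ("requiredElements", counts.getD "requiredElements" 0),
   ("optionalElements", counts.getD "optionalElements" 0),
   ("summaryElements", counts.getD "summaryElements" 0),
   ("modifierElements", counts.getD "modifierElements" 0)]

-- ===== PRECONDITION & SPEC =====
def Spec_calculate_element_stats (elements : List (List (String × Int))) (out : List (String × Int)) : Prop := out = calculate_element_stats_alt elements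
instance (elements : List (List (String × Int))) (out : List (String × Int)) : Decidable (Spec_calculate_element_stats elements out) := by unfold Spec_calculate_element_stats; infer_instance

-- ===== CLAIM (what is proved, stated in full; the proofs are below) =====
def Claim_equal_calculate_element_stats : Prop := ∀ (elements : List (List (String × Int))), Dom_calculate_element_stats elements → Spec_calculate_element_stats elements (calculate_element_stats elements)

-- ===== LEMMAS AND PROOFS =====
-- the count of label `lab` after the nested counting-dict loop: if each element
-- contributes `lab` exactly when `p` holds, the dict entry counts `p` over the list
theorem pv_getD_fold (lab : String) (p : List (String × Int) → Bool)
    (h : ∀ e, (pvClassify e).count lab = if p e then 1 else 0)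
    (elements : List (List (String × Int))) (d : PySem.Dict String Int) :
    (elements.foldl (fun d e =>
        (pvClassify e).foldl (fun d lab => d.modify lab 0 (· + 1)) d) d).getD lab 0
      = d.getD lab 0 + (elements.countP p : Int) := by
  induction elements generalizing d with
  | nil => simp
  | cons e es ih =>
      simp only [List.foldl_cons, List.countP_cons]
      rw [ih, PySem.Dict.getD_foldl_modify_add_one, h e]
      split_ifs <;> push_cast <;> omega

-- per-label characterisation of pvClassify's count
theorem pv_count_req (e : List (String × Int)) :
    (pvClassify e).count "requiredElements"
      = if (PySem.Dict.mk e).getD "min" 0 > 0 then 1 else 0 := by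
  unfold pvClassify; simp only [List.count_append]; split_ifs <;> simp

theorem pv_count_opt (e : List (String × Int)) :
    (pvClassify e).count "optionalElements"
      = if (PySem.Dict.mk e).getD "min" 0 = 0 then 1 else 0 := by
  unfold pvClassify; simp only [List.count_append]; split_ifs <;> simp

theorem pv_count_sum (e : List (String × Int)) :
    (pvClassify e).count "summaryElements"
      = if pvTruthy ((PySem.Dict.mk e).get? "isSummary") then 1 else 0 := by
  unfold pvClassify; simp only [List.count_append]; split_ifs <;> simp

theorem pv_count_mod (e : List (String × Int)) :
    (pvClassify e).count "modifierElements"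
      = if pvTruthy ((PySem.Dict.mk e).get? "isModifier") then 1 else 0 := by
  unfold pvClassify; simp only [List.count_append]; split_ifs <;> simp

-- ===== VERDICT (by name: the statement is the Claim_ definition above) =====
theorem calculate_element_stats_spec : Claim_equal_calculate_element_stats := by
  intro elements _
  unfold Spec_calculate_element_stats calculate_element_stats calculate_element_stats_alt
  dsimp only
  rw [pv_getD_fold "requiredElements" (fun e => decide ((PySem.Dict.mk e).getD "min" 0 > 0))
        (by intro e; rw [pv_count_req]; simp),
      pv_getD_fold "optionalElements" (fun e => decide ((PySem.Dict.mk e).getD "min" 0 = 0))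
        (by intro e; rw [pv_count_opt]; simp),
      pv_getD_fold "summaryElements" (fun e => pvTruthy ((PySem.Dict.mk e).get? "isSummary"))
        (by intro e; rw [pv_count_sum]),
      pv_getD_fold "modifierElements" (fun e => pvTruthy ((PySem.Dict.mk e).get? "isModifier"))
        (by intro e; rw [pv_count_mod]),
      PySem.Dict.getD_empty]
  simp only [zero_add]
  rw [PySem.List.foldl_ite_add_one, PySem.List.foldl_ite_add_one,
      PySem.List.foldl_if_add_one, PySem.List.foldl_if_add_one]
  simp
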